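-- pv_equiv track=rewrite | github.com/Gczmy/sudo_game | sudo/core/component.py | cal_number_of_remaining_num
-- ===== SOURCE A (Python) =====
-- def cal_number_of_remaining_num(cell_num_dict):
--     # calculate the number of remaining numbers(digits)
--     all_remain_num = [9 for _ in range(9)]
--     for num in range(9):
--         for v in cell_num_dict.values():
--             if v == (num+1):
--                 all_remain_num[num] -= 1
--                 if all_remain_num[num] < 0:
--                     all_remain_num[num] = 0
--     return all_remain_num
-- ===== SOURCE B (Python) =====
-- def cal_number_of_remaining_num(cell_num_dict):
--     # one pass over the values building a per-digit frequency table, then map it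
--     counts = [0] * 9
--     for v in cell_num_dict.values():
--         if v in range(1, 10):  # equality-based membership, no hashing
--             counts[int(v) - 1] += 1
--     return [max(0, 9 - c) for c in counts]
-- ===== Notes on version B (the rewrite author's own statement) =====
-- stated objective: simpler
-- what changed: B makes one pass over the values building a length-9 frequency table and maps it to [max(0, 9 - c)], instead of A's nine full scans over the values with in-place clamped decrements.
import Mathlib
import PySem

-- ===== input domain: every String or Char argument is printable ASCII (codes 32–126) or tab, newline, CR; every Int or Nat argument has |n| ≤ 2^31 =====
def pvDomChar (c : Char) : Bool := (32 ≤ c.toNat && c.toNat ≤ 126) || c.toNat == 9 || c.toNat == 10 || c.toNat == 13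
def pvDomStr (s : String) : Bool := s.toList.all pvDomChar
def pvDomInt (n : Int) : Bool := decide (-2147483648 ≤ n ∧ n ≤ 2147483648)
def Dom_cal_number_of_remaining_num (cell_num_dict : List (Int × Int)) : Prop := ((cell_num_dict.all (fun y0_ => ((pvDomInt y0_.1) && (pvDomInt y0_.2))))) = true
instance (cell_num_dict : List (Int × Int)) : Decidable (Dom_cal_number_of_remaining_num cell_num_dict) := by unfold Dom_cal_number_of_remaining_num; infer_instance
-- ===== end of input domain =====

-- B builds the per-digit frequency table in one pass and maps it, instead of A's nine scans; objective: simpler.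

-- ===== PORT A =====
def cal_number_of_remaining_num (cell_num_dict : List (Int × Int)) : List Int :=
  let all_remain_num := (List.range 9).map (fun _ => (9 : Int))
  (PySem.List.pyRange 0 9 1).foldl
    (fun arr num =>
      ((PySem.Dict.ofList cell_num_dict).values).foldl
        (fun arr v =>
          if v == num + 1 then
            let x := arr.getD num.toNat 0 - 1
            arr.set num.toNat (if x < 0 then 0 else x)
          else arr)
        arr)
    all_remain_num

-- ===== PORT B =====
def cal_number_of_remaining_num_alt (cell_num_dict : List (Int × Int)) : List Int :=
  let counts := ((PySem.Dict.ofList cell_num_dict).values).foldl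
    (fun c v =>
      if 1 ≤ v ∧ v < 10 then c.set (v - 1).toNat (c.getD (v - 1).toNat 0 + 1) else c)
    (List.replicate 9 (0 : Int))
  counts.map (fun c => max 0 (9 - c))

-- ===== PRECONDITION & SPEC =====
def Spec_cal_number_of_remaining_num (cell_num_dict : List (Int × Int)) (out : List Int) : Prop := out = cal_number_of_remaining_num_alt cell_num_dict
instance (cell_num_dict : List (Int × Int)) (out : List Int) : Decidable (Spec_cal_number_of_remaining_num cell_num_dict out) := by unfold Spec_cal_number_of_remaining_num; infer_instance

-- ===== CLAIM (what is proved, stated in full; the proofs are below) =====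
def Claim_equal_cal_number_of_remaining_num : Prop := ∀ (cell_num_dict : List (Int × Int)), Dom_cal_number_of_remaining_num cell_num_dict → Spec_cal_number_of_remaining_num cell_num_dict (cal_number_of_remaining_num cell_num_dict)

-- ===== LEMMAS AND PROOFS =====

-- A's inner loop over the values, for a fixed digit `num`
def pvInnerA (num : Int) (arr : List Int) (vals : List Int) : List Int :=
  vals.foldl
    (fun arr v =>
      if v == num + 1 then
        let x := arr.getD num.toNat 0 - 1
        arr.set num.toNat (if x < 0 then 0 else x)
      else arr)
    arr

theorem pvInnerA_length (num : Int) (arr : List Int) (vals : List Int) :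
    (pvInnerA num arr vals).length = arr.length := by
  induction vals generalizing arr with
  | nil => rfl
  | cons v vs ih =>
    simp only [pvInnerA, List.foldl_cons] at *
    split
    · rw [ih]; simp
    · exact ih arr

theorem pvInnerA_getD (num : Int) (vals : List Int) (arr : List Int)
    (h0 : 0 ≤ num) (h9 : num < 9) (hlen : arr.length = 9)
    (hpos : 0 ≤ arr.getD num.toNat 0) (m : Nat) :
    (pvInnerA num arr vals).getD m 0 =
      if m = num.toNat then max 0 (arr.getD m 0 - (vals.count (num + 1) : Int))
      else arr.getD m 0 := by
  induction vals generalizing arr with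
  | nil =>
    simp only [pvInnerA, List.foldl_nil, List.count_nil]
    split
    · next h => subst h; omega
    · rfl
  | cons v vs ih =>
    have hnlt : num.toNat < arr.length := by omega
    simp only [pvInnerA, List.foldl_cons] at *
    by_cases hv : v = num + 1
    · simp only [hv, beq_self_eq_true, if_true]
      set x := arr.getD num.toNat 0 - 1 with hx
      set arr' := arr.set num.toNat (if x < 0 then 0 else x) with harr'
      have hlen' : arr'.length = 9 := by simp [harr', hlen]
      have hget' : arr'.getD num.toNat 0 = (if x < 0 then 0 else x) := by
        rw [harr', List.getD_eq_getElem?_getD, List.getElem?_set_self (by omega)]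
        rfl
      have hpos' : 0 ≤ arr'.getD num.toNat 0 := by rw [hget']; split <;> omega
      rw [ih arr' hlen' hpos']
      split
      · next h =>
        subst h
        rw [hget', List.count_cons_self]
        push_cast
        by_cases hx0 : x < 0 <;> simp only [hx0, if_true, if_false] <;> omega
      · next h =>
        rw [harr', List.getD_eq_getElem?_getD, List.getElem?_set_ne (by omega),
          ← List.getD_eq_getElem?_getD]
    · have hb : (v == num + 1) = false := by simp [hv]
      simp only [hb, Bool.false_eq_true, if_false]
      rw [ih arr hlen hpos]
      have hcnt : ((v :: vs).count (num + 1) : Int) = (vs.count (num + 1) : Int) := by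
        rw [List.count_cons]; simp [hv]
      rw [hcnt]

-- A's outer loop over a list of digit indices
theorem pvOuterA_getD (vals : List Int) (nums : List Int) (arr : List Int)
    (hlen : arr.length = 9)
    (hpos : ∀ m : Nat, 0 ≤ arr.getD m 0)
    (hn : ∀ x ∈ nums, 0 ≤ x ∧ x < 9) (hnd : nums.Nodup) (m : Nat) :
    (nums.foldl (fun arr num => pvInnerA num arr vals) arr).getD m 0 =
      if (m : Int) ∈ nums then max 0 (arr.getD m 0 - (vals.count ((m : Int) + 1) : Int))
      else arr.getD m 0 := by
  induction nums generalizing arr with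
  | nil => simp
  | cons num ns ih =>
    obtain ⟨⟨hnum0, hnum9⟩, hns⟩ : (0 ≤ num ∧ num < 9) ∧ ∀ x ∈ ns, 0 ≤ x ∧ x < 9 := by
      exact ⟨hn num (by simp), fun x hx => hn x (by simp [hx])⟩
    have hnotmem : num ∉ ns := (List.nodup_cons.mp hnd).1
    have hndns : ns.Nodup := (List.nodup_cons.mp hnd).2
    set arr' := pvInnerA num arr vals with harr'
    have hlen' : arr'.length = 9 := by rw [harr', pvInnerA_length, hlen]
    have hget' : ∀ k : Nat, arr'.getD k 0 =
        if k = num.toNat then max 0 (arr.getD k 0 - (vals.count (num + 1) : Int))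
        else arr.getD k 0 := fun k =>
      pvInnerA_getD num vals arr hnum0 hnum9 hlen (hpos _) k
    have hpos' : ∀ k : Nat, 0 ≤ arr'.getD k 0 := by
      intro k; rw [hget']; split
      · omega
      · exact hpos k
    simp only [List.foldl_cons]
    rw [ih arr' hlen' hpos' hns hndns]
    by_cases hm : m = num.toNat
    · have hmeq : (m : Int) = num := by omega
      have h1 : (m : Int) ∉ ns := by rw [hmeq]; exact hnotmem
      have h2 : (m : Int) ∈ num :: ns := by simp [hmeq]
      rw [if_neg h1, hget' m, if_pos hm, if_pos h2, hmeq]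
    · have hmne : (m : Int) ≠ num := by omega
      rw [hget' m, if_neg hm]
      by_cases hmem : (m : Int) ∈ ns <;>
        simp [hmem, hmne, List.mem_cons]

-- B's counting loop, pointwise
theorem pvCountsB_length (vals : List Int) (c : List Int) :
    (vals.foldl
      (fun c v => if 1 ≤ v ∧ v < 10 then c.set (v - 1).toNat (c.getD (v - 1).toNat 0 + 1) else c)
      c).length = c.length := by
  induction vals generalizing c with
  | nil => rfl
  | cons v vs ih =>
    simp only [List.foldl_cons]
    split
    · rw [ih]; simp
    · exact ih c

theorem pvCountsB_getD (vals : List Int) (c : List Int) (hc : c.length = 9)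
    (d : Nat) (hd : d < 9) :
    (vals.foldl
      (fun c v => if 1 ≤ v ∧ v < 10 then c.set (v - 1).toNat (c.getD (v - 1).toNat 0 + 1) else c)
      c).getD d 0 = c.getD d 0 + (vals.count ((d : Int) + 1) : Int) := by
  induction vals generalizing c with
  | nil => simp
  | cons v vs ih =>
    simp only [List.foldl_cons]
    by_cases hv : 1 ≤ v ∧ v < 10
    · rw [if_pos hv]
      set c' := c.set (v - 1).toNat (c.getD (v - 1).toNat 0 + 1) with hc'
      have hc'len : c'.length = 9 := by simp [hc', hc]
      rw [ih c' hc'len]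
      have hvn : (v - 1).toNat < 9 := by omega
      by_cases hvd : v = (d : Int) + 1
      · have heq : (v - 1).toNat = d := by omega
        have hget : c'.getD d 0 = c.getD d 0 + 1 := by
          rw [hc', heq, List.getD_eq_getElem?_getD, List.getElem?_set_self (by omega)]
          rfl
        rw [hget, List.count_cons]
        simp [hvd]
        omega
      · have hne : (v - 1).toNat ≠ d := by omega
        have hget : c'.getD d 0 = c.getD d 0 := by
          rw [hc', List.getD_eq_getElem?_getD, List.getElem?_set_ne hne,
            ← List.getD_eq_getElem?_getD]
        rw [hget, List.count_cons]
        simp [hvd]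
    · rw [if_neg hv]
      rw [ih c hc]
      have hvd : v ≠ (d : Int) + 1 := by omega
      rw [List.count_cons]
      simp [hvd]

-- ===== VERDICT (by name: the statement is the Claim_ definition above) =====
theorem cal_number_of_remaining_num_spec : Claim_equal_cal_number_of_remaining_num := by
  intro cell_num_dict _
  unfold Spec_cal_number_of_remaining_num
  unfold cal_number_of_remaining_num cal_number_of_remaining_num_alt
  set vals := (PySem.Dict.ofList cell_num_dict).values with hvals
  set init : List Int := (List.range 9).map (fun _ => (9 : Int)) with hinit
  have hinitlen : init.length = 9 := by simp [hinit]
  have hinitgetD : ∀ m : Nat, m < 9 → init.getD m 0 = 9 := by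
    intro m hm
    rw [hinit]
    interval_cases m <;> rfl
  have hinitpos : ∀ m : Nat, 0 ≤ init.getD m 0 := by
    intro m
    by_cases hm : m < 9
    · rw [hinitgetD m hm]; norm_num
    · rw [List.getD_eq_getElem?_getD, List.getElem?_eq_none (by omega)]; rfl
  have hrange : PySem.List.pyRange 0 9 1 = [0, 1, 2, 3, 4, 5, 6, 7, 8] := by decide
  have hfold : (PySem.List.pyRange 0 9 1).foldl (fun arr num => pvInnerA num arr vals) init
      = (PySem.List.pyRange 0 9 1).foldl
          (fun arr num =>
            vals.foldl
              (fun arr v =>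
                if v == num + 1 then
                  let x := arr.getD num.toNat 0 - 1
                  arr.set num.toNat (if x < 0 then 0 else x)
                else arr)
              arr)
          init := rfl
  rw [← hfold]
  set counts := vals.foldl
      (fun c v => if 1 ≤ v ∧ v < 10 then c.set (v - 1).toNat (c.getD (v - 1).toNat 0 + 1) else c)
      (List.replicate 9 (0 : Int)) with hcounts
  have hAlen : ((PySem.List.pyRange 0 9 1).foldl (fun arr num => pvInnerA num arr vals) init).length = 9 := by
    rw [hrange]
    simp only [List.foldl_cons, List.foldl_nil, pvInnerA_length]
    exact hinitlen
  have hClen : counts.length = 9 := by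
    rw [hcounts, pvCountsB_length]; simp
  have hBlen : (counts.map (fun c => max 0 (9 - c))).length = 9 := by
    rw [List.length_map]; exact hClen
  apply List.ext_getElem (by rw [hAlen, hBlen])
  intro m hmA hmB
  have hm9 : m < 9 := by omega
  have hA : ((PySem.List.pyRange 0 9 1).foldl (fun arr num => pvInnerA num arr vals) init).getD m 0
      = max 0 (9 - (vals.count ((m : Int) + 1) : Int)) := by
    rw [pvOuterA_getD vals _ init hinitlen hinitpos
      (by rw [hrange]; intro x hx; fin_cases hx <;> norm_num)
      (by rw [hrange]; decide) m]
    have hmem : (m : Int) ∈ PySem.List.pyRange 0 9 1 := by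
      rw [hrange]
      interval_cases m <;> decide
    rw [if_pos hmem, hinitgetD m hm9]
  have hB : (counts.map (fun c => max 0 (9 - c))).getD m 0
      = max 0 (9 - (vals.count ((m : Int) + 1) : Int)) := by
    have hCgetD : counts.getD m 0 = (vals.count ((m : Int) + 1) : Int) := by
      rw [hcounts, pvCountsB_getD vals _ (by simp) m hm9]
      rw [List.getD_replicate _ hm9, zero_add]
    have hmc : m < counts.length := by omega
    rw [List.getD_eq_getElem _ 0 hmB, List.getElem_map,
      ← List.getD_eq_getElem counts 0 hmc, hCgetD]
  rw [← List.getD_eq_getElem _ 0 hmA, ← List.getD_eq_getElem _ 0 hmB, hA, hB]
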